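-- pv_equiv track=rewrite | github.com/OrPerets/data-engineering-course | diagrams/align_to_template.py | end_of_first_header
-- ===== SOURCE A (Python) =====
-- def end_of_first_header(lines):
--     """Index of last line of first canonical header (closing } of component<<failure>>)."""
--     seen_failure = False
--     for i, line in enumerate(lines):
--         if "component<<failure>>" in line:
--             seen_failure = True
--         if seen_failure and line.strip() == "}":
--             return i
--     return -1
-- ===== SOURCE B (Python) =====
-- def end_of_first_header(lines):
--     # Backward pass: maintain the smallest index >= i whose line strips to "}"
--     # (b) and the answer for the suffix starting at i (ans); the answer for a
--     # suffix beginning with a marker line is that suffix's first brace index.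
--     b = -1
--     ans = -1
--     for i in range(len(lines) - 1, -1, -1):
--         if lines[i].strip() == "}":
--             b = i
--         if "component<<failure>>" in lines[i]:
--             ans = b
--     return ans
-- ===== Notes on version B (the rewrite author's own statement) =====
-- stated objective: alternative
-- what changed: Replaces A's forward scan with a seen-marker flag by a single backward pass (right fold) that maintains two accumulators: the first closing-brace index of the current suffix and the answer for that suffix, overwriting the answer at each marker line.
import Mathlib
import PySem

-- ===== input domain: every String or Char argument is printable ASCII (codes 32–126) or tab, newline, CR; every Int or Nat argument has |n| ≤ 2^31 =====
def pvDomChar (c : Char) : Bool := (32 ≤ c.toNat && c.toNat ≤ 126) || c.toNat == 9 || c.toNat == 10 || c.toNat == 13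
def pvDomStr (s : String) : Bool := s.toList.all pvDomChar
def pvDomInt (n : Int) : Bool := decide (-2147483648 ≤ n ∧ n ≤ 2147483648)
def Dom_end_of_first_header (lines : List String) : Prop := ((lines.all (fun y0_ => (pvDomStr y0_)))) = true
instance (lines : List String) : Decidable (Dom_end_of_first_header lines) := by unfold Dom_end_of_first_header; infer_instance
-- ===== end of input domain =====

-- B replaces A's forward flag scan by a single backward pass carrying two
-- accumulators (first brace index of the suffix, answer for the suffix).

-- ===== PORT A =====
-- A's loop: enumerate with a boolean flag `seen_failure`.
def pyGoA : List String → Bool → Nat → Int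
  | [], _, _ => -1
  | l :: ls, seen, i =>
    let seen' := if PySem.Str.isIn "component<<failure>>" l then true else seen
    if seen' && (PySem.Str.strip l == "}") then (i : Int) else pyGoA ls seen' (i + 1)

def end_of_first_header (lines : List String) : Int := pyGoA lines false 0

-- ===== PORT B =====
-- B's backward loop as structural recursion on the suffix starting at index i:
-- returns (b, ans) = (first "}"-line index in the suffix or -1, answer for the suffix).
def pvBack : List String → Nat → Int × Int
  | [], _ => (-1, -1)
  | l :: ls, i =>
    let p := pvBack ls (i + 1)
    let b := if PySem.Str.strip l == "}" then (i : Int) else p.1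
    let ans := if PySem.Str.isIn "component<<failure>>" l then b else p.2
    (b, ans)

def end_of_first_header_alt (lines : List String) : Int := (pvBack lines 0).2

-- ===== PRECONDITION & SPEC =====
def Spec_end_of_first_header (lines : List String) (out : Int) : Prop := out = end_of_first_header_alt lines
instance (lines : List String) (out : Int) : Decidable (Spec_end_of_first_header lines out) := by unfold Spec_end_of_first_header; infer_instance

-- ===== CLAIM (what is proved, stated in full; the proofs are below) =====
def Claim_equal_end_of_first_header : Prop := ∀ (lines : List String), Dom_end_of_first_header lines → Spec_end_of_first_header lines (end_of_first_header lines)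

-- ===== LEMMAS AND PROOFS =====

-- once A's flag is set, its loop returns the first "}"-line index, i.e. pvBack's .1
theorem pyGoA_true (ls : List String) : ∀ i : Nat, pyGoA ls true i = (pvBack ls i).1 := by
  induction ls with
  | nil => intro i; rfl
  | cons l ls ih =>
    intro i
    by_cases hb : (PySem.Str.strip l == "}") = true <;>
      simp [pyGoA, pvBack, hb, ih (i + 1)]

-- with the flag unset, A's loop computes pvBack's .2
theorem pyGoA_false (ls : List String) : ∀ i : Nat, pyGoA ls false i = (pvBack ls i).2 := by
  induction ls with
  | nil => intro i; rfl
  | cons l ls ih =>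
    intro i
    by_cases hm : (PySem.Str.isIn "component<<failure>>" l) = true
    · by_cases hb : (PySem.Str.strip l == "}") = true <;>
        simp_all [pyGoA, pvBack, pyGoA_true]
    · simp_all [pyGoA, pvBack]

-- ===== VERDICT (by name: the statement is the Claim_ definition above) =====
theorem end_of_first_header_spec : Claim_equal_end_of_first_header := by
  intro lines _
  unfold Spec_end_of_first_header end_of_first_header end_of_first_header_alt
  exact pyGoA_false lines 0
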